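-- pv_equiv track=rewrite | github.com/vbukovska/SoftUni | Python_advanced/Ex3_multidimentional_lists/snake_moves.py | create_snake_matrix
-- ===== SOURCE A (Python) =====
-- def create_snake_matrix(rows, columns, snake):
--     matrix = []
--     el = 0
--     for i in range(rows):
--         matrix.append([])
--         if i % 2 == 0:
--             for j in range(columns):
--                 matrix[i].append(snake[el])
--                 if el < len(snake) - 1:
--                     el += 1
--                 else:
--                     el = 0
--
--         else:
--             for j in range(-1, -columns - 1, -1):
--                 matrix[i].insert(j, snake[el])
--                 if el < len(snake) - 1:
--                     el += 1
--                 else: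
--                     el = 0
--     return matrix
-- ===== SOURCE B (Python) =====
-- def create_snake_matrix(rows, columns, snake):
--     matrix = []
--     for i in range(rows):
--         base = i * columns
--         if i % 2 == 0:
--             row = [snake[(base + c) % len(snake)] for c in range(columns)]
--         else:
--             row = [snake[(base + columns - 1 - c) % len(snake)] for c in range(columns)]
--         matrix.append(row)
--     return matrix
-- ===== Notes on version B (the rewrite author's own statement) =====
-- stated objective: simpler
-- what changed: Replaces the running wrap-around counter `el` and the negative-index list.insert reversal with direct closed-form indexing: cell (i,c) is snake[k % len(snake)] where k = i*columns + c on even rows and k = i*columns + (columns-1-c) on odd rows, rows built left-to-right by comprehension.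
import Mathlib
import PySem

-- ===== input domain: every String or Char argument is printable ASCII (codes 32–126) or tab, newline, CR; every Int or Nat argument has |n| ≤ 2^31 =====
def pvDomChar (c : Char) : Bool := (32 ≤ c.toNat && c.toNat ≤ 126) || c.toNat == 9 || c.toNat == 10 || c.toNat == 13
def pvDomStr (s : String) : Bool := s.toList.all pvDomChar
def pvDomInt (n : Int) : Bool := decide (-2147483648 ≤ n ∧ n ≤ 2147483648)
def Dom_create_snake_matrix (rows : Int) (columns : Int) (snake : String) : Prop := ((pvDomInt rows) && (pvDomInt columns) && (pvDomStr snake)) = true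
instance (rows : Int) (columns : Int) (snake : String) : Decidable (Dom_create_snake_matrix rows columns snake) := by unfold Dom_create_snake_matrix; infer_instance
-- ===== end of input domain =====

-- B replaces A's running wrap-around counter `el` and the negative-index list.insert
-- reversal by direct closed-form modular indexing per cell (objective: simpler).


-- ===== PORT A =====
-- Python snake[el] yields a one-char string: ported as pyGet? (Char) + toString,
-- made total with getD; the index is out of range only outside Pre_ below.
def create_snake_matrix (rows : Int) (columns : Int) (snake : String) : List (List String) :=
  ((PySem.List.pyRange 0 rows).foldl
    (fun (st : List (List String) × Int) i =>
      if PySem.Int.mod i 2 == 0 then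
        let inner := (PySem.List.pyRange 0 columns).foldl
          (fun (rc : List String × Int) _j =>
            (rc.1 ++ [((PySem.Str.pyGet? snake rc.2).getD ' ').toString],
             if rc.2 < PySem.Str.len snake - 1 then rc.2 + 1 else 0)) ([], st.2)
        (st.1 ++ [inner.1], inner.2)
      else
        let inner := (PySem.List.pyRange (-1) (-columns - 1) (-1)).foldl
          (fun (rc : List String × Int) j =>
            (PySem.List.insert rc.1 j ((PySem.Str.pyGet? snake rc.2).getD ' ').toString,
             if rc.2 < PySem.Str.len snake - 1 then rc.2 + 1 else 0)) ([], st.2)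
        (st.1 ++ [inner.1], inner.2))
    ([], 0)).1

-- ===== PORT B =====
-- ===== PORT B =====
def create_snake_matrix_alt (rows : Int) (columns : Int) (snake : String) : List (List String) :=
  (PySem.List.pyRange 0 rows).map (fun i =>
    if PySem.Int.mod i 2 == 0 then
      (PySem.List.pyRange 0 columns).map (fun c =>
        ((PySem.Str.pyGet? snake (PySem.Int.mod (i * columns + c) (PySem.Str.len snake))).getD ' ').toString)
    else
      (PySem.List.pyRange 0 columns).map (fun c =>
        ((PySem.Str.pyGet? snake (PySem.Int.mod (i * columns + columns - 1 - c) (PySem.Str.len snake))).getD ' ').toString))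

-- ===== PRECONDITION & SPEC =====
-- A raises IndexError (snake[0] on the empty string) exactly when rows > 0,
-- columns > 0 and snake = ""; B raises there too (ZeroDivisionError); Pre_ excludes only those inputs.
def Pre_create_snake_matrix (rows : Int) (columns : Int) (snake : String) : Prop :=
  rows ≤ 0 ∨ columns ≤ 0 ∨ snake ≠ ""
instance (rows : Int) (columns : Int) (snake : String) : Decidable (Pre_create_snake_matrix rows columns snake) := by unfold Pre_create_snake_matrix; infer_instance
def pvWitness_create_snake_matrix : Int × Int × String := (3, 4, "abc")
def Spec_create_snake_matrix (rows : Int) (columns : Int) (snake : String) (out : List (List String)) : Prop := out = create_snake_matrix_alt rows columns snake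
instance (rows : Int) (columns : Int) (snake : String) (out : List (List String)) : Decidable (Spec_create_snake_matrix rows columns snake out) := by unfold Spec_create_snake_matrix; infer_instance

-- ===== CLAIM (what is proved, stated in full; the proofs are below) =====
def Claim_equal_create_snake_matrix : Prop := ∀ (rows : Int) (columns : Int) (snake : String), Dom_create_snake_matrix rows columns snake → Pre_create_snake_matrix rows columns snake → Spec_create_snake_matrix rows columns snake (create_snake_matrix rows columns snake)

-- ===== LEMMAS AND PROOFS =====

-- ===== LEMMAS AND PROOFS =====

-- Python list.insert clamps a far-negative position to the front.
lemma pv_insert_front {α : Type} (l : List α) (i : Int) (v : α) (h : i + l.length ≤ 0) :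
    PySem.List.insert l i v = v :: l := by
  unfold PySem.List.insert PySem.List.sliceIndices
  norm_num
  by_cases hi : i < 0
  · rw [if_pos hi]
    have : (i + ↑l.length) ⊔ 0 = 0 := by omega
    rw [this]; norm_num
  · rw [if_neg hi]
    have hi0 : i = 0 := by omega
    subst hi0
    have : (0:Int) ⊓ ↑l.length = 0 := by omega
    rw [this]; norm_num

lemma pv_bump (snake : String) (e : Int) (h0 : 0 ≤ e) (h1 : e < (snake.toList.length : Int)) :
    (if e < PySem.Str.len snake - 1 then e + 1 else 0) = (e + 1) % (snake.toList.length : Int) := by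
  rw [PySem.Str.len_eq]
  split_ifs with h
  · rw [Int.emod_eq_of_lt (by omega) (by omega)]
  · have he : e = (snake.toList.length : Int) - 1 := by omega
    subst he
    simp

lemma pv_reverse_range (n : Nat) :
    (List.range n).reverse = (List.range n).map (fun k => n - 1 - k) := by
  apply List.ext_getElem <;> simp

lemma pv_even_fold (snake : String) (hL : 0 < (snake.toList.length : Int)) (n : Nat) :
    ∀ (acc : List String) (el : Int), 0 ≤ el → el < (snake.toList.length : Int) →
    (List.range n).foldl
      (fun (rc : List String × Int) (_j : Nat) =>
        (rc.1 ++ [((PySem.Str.pyGet? snake rc.2).getD ' ').toString],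
         if rc.2 < PySem.Str.len snake - 1 then rc.2 + 1 else 0)) (acc, el)
    = (acc ++ (List.range n).map (fun (c : Nat) =>
         ((PySem.Str.pyGet? snake ((el + (c : Int)) % (snake.toList.length : Int))).getD ' ').toString),
       (el + n) % (snake.toList.length : Int)) := by
  induction n with
  | zero =>
    intro acc el h0 h1
    simp only [List.range_zero, List.foldl_nil, List.map_nil, List.append_nil, Nat.cast_zero,
      add_zero, Prod.mk.injEq]
    exact ⟨trivial, (Int.emod_eq_of_lt h0 h1).symm⟩
  | succ n ih =>
    intro acc el h0 h1
    rw [List.range_succ, List.foldl_append, ih acc el h0 h1]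
    simp only [List.foldl_cons, List.foldl_nil]
    rw [pv_bump snake _ (Int.emod_nonneg _ (by omega)) (Int.emod_lt_of_pos _ hL),
      Int.emod_add_emod]
    simp only [List.map_append, List.map_cons, List.map_nil, List.append_assoc, Prod.mk.injEq]
    refine ⟨by simp, by push_cast; ring_nf⟩

lemma pv_odd_fold (snake : String) (hL : 0 < (snake.toList.length : Int)) (n : Nat) :
    ∀ (el : Int), 0 ≤ el → el < (snake.toList.length : Int) →
    (List.range n).foldl
      (fun (rc : List String × Int) (k : Nat) =>
        (PySem.List.insert rc.1 ((-1 : Int) - (k : Int)) ((PySem.Str.pyGet? snake rc.2).getD ' ').toString,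
         if rc.2 < PySem.Str.len snake - 1 then rc.2 + 1 else 0)) ([], el)
    = (((List.range n).map (fun (c : Nat) =>
         ((PySem.Str.pyGet? snake ((el + (c : Int)) % (snake.toList.length : Int))).getD ' ').toString)).reverse,
       (el + n) % (snake.toList.length : Int)) := by
  induction n with
  | zero =>
    intro el h0 h1
    simp only [List.range_zero, List.map_nil, List.foldl_nil, List.reverse_nil, Nat.cast_zero,
      add_zero, Prod.mk.injEq]
    exact ⟨trivial, (Int.emod_eq_of_lt h0 h1).symm⟩
  | succ n ih =>
    intro el h0 h1
    rw [List.range_succ, List.foldl_append, ih el h0 h1]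
    simp only [List.foldl_cons, List.foldl_nil]
    rw [pv_insert_front _ _ _ (by simp)]
    rw [pv_bump snake _ (Int.emod_nonneg _ (by omega)) (Int.emod_lt_of_pos _ hL),
      Int.emod_add_emod]
    simp only [List.map_append, List.map_cons, List.map_nil, List.reverse_append,
      List.reverse_cons, List.reverse_nil, List.nil_append, List.singleton_append, Prod.mk.injEq]
    refine ⟨by simp, by push_cast; ring_nf⟩

lemma pv_outer (snake : String) (columns : Int) (hC : 0 < columns)
    (hL : 0 < (snake.toList.length : Int)) (n : Nat) :
    (PySem.List.pyRange 0 (n : Int)).foldl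
      (fun (st : List (List String) × Int) i =>
        if PySem.Int.mod i 2 == 0 then
          let inner := (PySem.List.pyRange 0 columns).foldl
            (fun (rc : List String × Int) _j =>
              (rc.1 ++ [((PySem.Str.pyGet? snake rc.2).getD ' ').toString],
               if rc.2 < PySem.Str.len snake - 1 then rc.2 + 1 else 0)) ([], st.2)
          (st.1 ++ [inner.1], inner.2)
        else
          let inner := (PySem.List.pyRange (-1) (-columns - 1) (-1)).foldl
            (fun (rc : List String × Int) j =>
              (PySem.List.insert rc.1 j ((PySem.Str.pyGet? snake rc.2).getD ' ').toString,
               if rc.2 < PySem.Str.len snake - 1 then rc.2 + 1 else 0)) ([], st.2)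
          (st.1 ++ [inner.1], inner.2))
      ([], 0)
    = ((PySem.List.pyRange 0 (n : Int)).map (fun i =>
        if PySem.Int.mod i 2 == 0 then
          (PySem.List.pyRange 0 columns).map (fun c =>
            ((PySem.Str.pyGet? snake (PySem.Int.mod (i * columns + c) (PySem.Str.len snake))).getD ' ').toString)
        else
          (PySem.List.pyRange 0 columns).map (fun c =>
            ((PySem.Str.pyGet? snake (PySem.Int.mod (i * columns + columns - 1 - c) (PySem.Str.len snake))).getD ' ').toString)),
       ((n : Int) * columns) % (snake.toList.length : Int)) := by
  induction n with
  | zero =>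
    simp [PySem.List.pyRange_one_eq_nil (le_refl (0:Int))]
  | succ n ih =>
    have hcast : ((n + 1 : Nat) : Int) = (n : Int) + 1 := by push_cast; ring_nf
    rw [hcast, PySem.List.pyRange_one_succ_right (by positivity), List.foldl_append,
      List.map_append, ih]
    simp only [List.foldl_cons, List.foldl_nil, List.map_cons]
    have hel0 : 0 ≤ ((n : Int) * columns) % (snake.toList.length : Int) :=
      Int.emod_nonneg _ (by omega)
    have hel1 : ((n : Int) * columns) % (snake.toList.length : Int) < (snake.toList.length : Int) :=
      Int.emod_lt_of_pos _ hL
    have hCtoNat : ((columns.toNat : Nat) : Int) = columns := Int.toNat_of_nonneg hC.le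
    by_cases hpar : (PySem.Int.mod (n : Int) 2 == 0) = true
    · rw [if_pos hpar, if_pos hpar]
      rw [PySem.List.pyRange_one 0 columns, List.foldl_map,
        pv_even_fold snake hL _ _ _ hel0 hel1]
      simp only [Prod.mk.injEq, List.nil_append, sub_zero]
      constructor
      · congr 2
        rw [List.map_map]
        apply List.map_congr_left
        intro k _
        simp only [Function.comp, zero_add]
        rw [PySem.Str.len_eq, PySem.Int.mod_eq_emod_of_pos hL, Int.emod_add_emod]
      · rw [Int.emod_add_emod, hCtoNat]
        congr 1
        ring1
    · rw [if_neg hpar, if_neg hpar]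
      have harg : (-1 : Int) - (-columns - 1) = columns := by omega
      rw [PySem.List.pyRange_neg_one, harg, List.foldl_map,
        pv_odd_fold snake hL _ _ hel0 hel1]
      simp only [Prod.mk.injEq]
      constructor
      · congr 2
        rw [← List.map_reverse, pv_reverse_range, List.map_map,
          PySem.List.pyRange_one 0 columns, List.map_map]
        simp only [sub_zero]
        apply List.map_congr_left
        intro k hk
        rw [List.mem_range] at hk
        simp only [Function.comp, zero_add]
        have hcast2 : ((columns.toNat - 1 - k : Nat) : Int) = columns - 1 - (k : Int) := by
          omega
        rw [hcast2, PySem.Str.len_eq, PySem.Int.mod_eq_emod_of_pos hL, Int.emod_add_emod]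
        ring_nf
      · rw [Int.emod_add_emod, hCtoNat]
        congr 1
        ring1

lemma pv_cols_nonpos (snake : String) (columns : Int) (hC : columns ≤ 0) :
    ∀ (l : List Int) (p : List (List String) × Int),
    l.foldl
      (fun (st : List (List String) × Int) i =>
        if PySem.Int.mod i 2 == 0 then
          let inner := (PySem.List.pyRange 0 columns).foldl
            (fun (rc : List String × Int) _j =>
              (rc.1 ++ [((PySem.Str.pyGet? snake rc.2).getD ' ').toString],
               if rc.2 < PySem.Str.len snake - 1 then rc.2 + 1 else 0)) ([], st.2)
          (st.1 ++ [inner.1], inner.2)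
        else
          let inner := (PySem.List.pyRange (-1) (-columns - 1) (-1)).foldl
            (fun (rc : List String × Int) j =>
              (PySem.List.insert rc.1 j ((PySem.Str.pyGet? snake rc.2).getD ' ').toString,
               if rc.2 < PySem.Str.len snake - 1 then rc.2 + 1 else 0)) ([], st.2)
          (st.1 ++ [inner.1], inner.2))
      p
    = (p.1 ++ l.map (fun _ => ([] : List String)), p.2) := by
  intro l
  induction l with
  | nil => intro p; simp
  | cons i t ih =>
    intro p
    simp only [List.foldl_cons, List.map_cons]
    rw [ih]
    by_cases h : (PySem.Int.mod i 2 == 0) = true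
    · rw [if_pos h]
      rw [PySem.List.pyRange_one_eq_nil hC]
      simp
    · rw [if_neg h]
      rw [PySem.List.pyRange_neg_one_eq_nil (show (-1:Int) ≤ -columns - 1 by omega)]
      simp

-- ===== VERDICT (by name: the statement is the Claim_ definition above) =====
theorem create_snake_matrix_spec : Claim_equal_create_snake_matrix := by
  intro rows columns snake _hdom hpre
  unfold Spec_create_snake_matrix create_snake_matrix create_snake_matrix_alt
  by_cases hR : rows ≤ 0
  · rw [PySem.List.pyRange_one_eq_nil hR]
    simp
  · rw [not_le] at hR
    by_cases hC : columns ≤ 0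
    · rw [pv_cols_nonpos snake columns hC _ ([], 0)]
      simp only [List.nil_append]
      apply List.map_congr_left
      intro i _
      simp [PySem.List.pyRange_one_eq_nil hC]
    · rw [not_le] at hC
      have hsnake : snake ≠ "" := by
        rcases hpre with h | h | h
        · omega
        · omega
        · exact h
      have htl : snake.toList ≠ [] := by
        intro hl
        exact hsnake (by rw [← String.ofList_toList (s := snake), hl])
      have hL : 0 < (snake.toList.length : Int) := by
        have := List.length_pos_iff.mpr htl
        omega
      have hrows : rows = ((rows.toNat : Nat) : Int) := (Int.toNat_of_nonneg hR.le).symm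
      rw [hrows, pv_outer snake columns hC hL rows.toNat]
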